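-- pv_equiv track=rewrite | github.com/kevinewmtpl/ai-doc-generator | app.py | clean_ms_text
-- ===== SOURCE A (Python) =====
-- def clean_ms_text(text):
--     banned_phrases = [
--         "The above equipment selection",
--         "These safety controls",
--         "The above sequence",
--         "This sequence",
--         "This method statement",
--         "consistent with Eric Wong Machinery Transportation Pte Ltd",
--         "company’s established method statement style",
--         "company's established method statement style",
--         "standard precautions repeatedly stated",
--         "reflect the standard precautions",
--         "follows the company",
--         "previous method statements",
--         "prior method statements",
--     ]
--
--     lines = str(text).splitlines()
--     cleaned = []
--
--     for line in lines:
--         if not any(phrase.lower() in line.lower() for phrase in banned_phrases):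
--             cleaned.append(line)
--
--     return "\n".join(cleaned).strip()
-- ===== SOURCE B (Python) =====
-- _BANNED = [
--     "The above equipment selection",
--     "These safety controls",
--     "The above sequence",
--     "This sequence",
--     "This method statement",
--     "consistent with Eric Wong Machinery Transportation Pte Ltd",
--     "company\u2019s established method statement style",
--     "company's established method statement style",
--     "standard precautions repeatedly stated",
--     "reflect the standard precautions",
--     "follows the company",
--     "previous method statements",
--     "prior method statements",
-- ]
-- _PHRASES = [p.lower() for p in _BANNED]
--
--
-- def _has_banned(low):
--     # single left-to-right scan: at each position try every (pre-lowered) phrase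
--     for i in range(len(low)):
--         for p in _PHRASES:
--             if low.startswith(p, i):
--                 return True
--     return False
--
--
-- def clean_ms_text(text):
--     kept = [line for line in str(text).splitlines() if not _has_banned(line.lower())]
--     return "\n".join(kept).strip()
-- ===== Notes on version B (the rewrite author's own statement) =====
-- stated objective: alternative
-- what changed: B pre-lowers the phrase list once at module scope and replaces the per-phrase substring membership tests with a single left-to-right position scan that tries every phrase at each position of the lowered line, filtering lines via a comprehension instead of an append loop.
import Mathlib
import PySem

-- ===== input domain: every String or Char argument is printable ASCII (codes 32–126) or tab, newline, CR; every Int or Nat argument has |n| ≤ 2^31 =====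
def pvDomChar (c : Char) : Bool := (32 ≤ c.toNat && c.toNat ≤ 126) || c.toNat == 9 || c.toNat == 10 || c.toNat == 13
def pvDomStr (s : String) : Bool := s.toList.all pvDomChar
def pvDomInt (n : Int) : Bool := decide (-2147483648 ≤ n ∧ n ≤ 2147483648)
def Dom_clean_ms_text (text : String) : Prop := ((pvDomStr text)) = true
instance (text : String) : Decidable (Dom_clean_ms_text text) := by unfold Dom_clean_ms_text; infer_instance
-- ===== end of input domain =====

-- B replaces the per-phrase substring test by one left-to-right position scan with pre-lowered phrases (alternative decomposition).


-- ===== PORT A =====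
def bannedPhrasesA : List String := [
    "The above equipment selection",
    "These safety controls",
    "The above sequence",
    "This sequence",
    "This method statement",
    "consistent with Eric Wong Machinery Transportation Pte Ltd",
    "company’s established method statement style",
    "company's established method statement style",
    "standard precautions repeatedly stated",
    "reflect the standard precautions",
    "follows the company",
    "previous method statements",
    "prior method statements"]

def clean_ms_text (text : String) : String :=
  let lines := PySem.Str.splitlines text
  let cleaned := lines.foldl (fun acc line =>
    if !(bannedPhrasesA.any (fun phrase =>
          PySem.Str.isIn (PySem.Str.lower phrase) (PySem.Str.lower line))) then
      acc ++ [line]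
    else acc) []
  PySem.Str.strip (PySem.Str.join "\n" cleaned)

-- ===== PORT B =====
def bannedSrcB : List String := [
    "The above equipment selection",
    "These safety controls",
    "The above sequence",
    "This sequence",
    "This method statement",
    "consistent with Eric Wong Machinery Transportation Pte Ltd",
    "company’s established method statement style",
    "company's established method statement style",
    "standard precautions repeatedly stated",
    "reflect the standard precautions",
    "follows the company",
    "previous method statements",
    "prior method statements"]

def phrasesB : List (List Char) := bannedSrcB.map (fun p => PySem.Chars.lower p.toList)

-- '_has_banned': scan the lowered line position by position, trying every phrase at each position
def hasBannedB : List Char → Bool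
  | [] => false
  | c :: rest => phrasesB.any (fun p => p.isPrefixOf (c :: rest)) || hasBannedB rest

def clean_ms_text_alt (text : String) : String :=
  let kept := (PySem.Str.splitlines text).filter
    (fun line => !(hasBannedB (PySem.Chars.lower line.toList)))
  PySem.Str.strip (PySem.Str.join "\n" kept)

-- ===== PRECONDITION & SPEC =====
def Spec_clean_ms_text (text : String) (out : String) : Prop := out = clean_ms_text_alt text
instance (text : String) (out : String) : Decidable (Spec_clean_ms_text text out) := by unfold Spec_clean_ms_text; infer_instance

-- ===== CLAIM (what is proved, stated in full; the proofs are below) =====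
def Claim_equal_clean_ms_text : Prop := ∀ (text : String), Dom_clean_ms_text text → Spec_clean_ms_text text (clean_ms_text text)

-- ===== LEMMAS AND PROOFS =====

theorem phrasesB_ne_nil : ∀ p ∈ phrasesB, p ≠ [] := by decide

theorem hasBannedB_iff (t : List Char) :
    hasBannedB t = true ↔ ∃ p ∈ phrasesB, ∃ j, p <+: t.drop j := by
  induction t with
  | nil =>
    simp only [hasBannedB, List.drop_nil]
    constructor
    · intro h; cases h
    · rintro ⟨p, hp, j, hpre⟩
      exact absurd (List.prefix_nil.mp hpre) (phrasesB_ne_nil p hp)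
  | cons c rest ih =>
    simp only [hasBannedB, Bool.or_eq_true, List.any_eq_true, List.isPrefixOf_iff_prefix, ih]
    constructor
    · rintro (⟨p, hp, hpre⟩ | ⟨p, hp, j, hpre⟩)
      · exact ⟨p, hp, 0, hpre⟩
      · exact ⟨p, hp, j + 1, by simpa using hpre⟩
    · rintro ⟨p, hp, j, hpre⟩
      cases j with
      | zero => exact Or.inl ⟨p, hp, hpre⟩
      | succ j => exact Or.inr ⟨p, hp, j, by simpa using hpre⟩

theorem test_eq (line : String) :
    bannedPhrasesA.any (fun phrase =>
        PySem.Str.isIn (PySem.Str.lower phrase) (PySem.Str.lower line))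
      = hasBannedB (PySem.Chars.lower line.toList) := by
  rw [Bool.eq_iff_iff, hasBannedB_iff]
  simp only [List.any_eq_true, PySem.Str.isIn_eq, PySem.Str.toList_lower]
  constructor
  · rintro ⟨phrase, hp, hin⟩
    obtain ⟨j, hpre⟩ := (PySem.Chars.exists_prefix_drop_iff_isIn _ _).mpr hin
    exact ⟨PySem.Chars.lower phrase.toList, List.mem_map_of_mem hp, j, hpre⟩
  · rintro ⟨p, hp, j, hpre⟩
    obtain ⟨phrase, hphrase, rfl⟩ := List.mem_map.mp hp
    exact ⟨phrase, hphrase,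
      (PySem.Chars.exists_prefix_drop_iff_isIn _ _).mp ⟨j, hpre⟩⟩

-- ===== VERDICT (by name: the statement is the Claim_ definition above) =====
theorem clean_ms_text_spec : Claim_equal_clean_ms_text := by
  intro text _
  unfold Spec_clean_ms_text clean_ms_text clean_ms_text_alt
  simp only [PySem.List.foldl_append_if_eq_filter, List.nil_append]
  congr 2
  apply List.filter_congr
  intro line _
  rw [test_eq]
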